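-- pv_equiv track=rewrite | github.com/digitaloracle/israel_cars | main.py | create_pollution_scale
-- ===== SOURCE A (Python) =====
-- def create_pollution_scale(pollution_group: int) -> str:
--     """Create a visual pollution scale with colors using emoji blocks.
--
--     The Israeli pollution scale has 15 grades (1-15).
--     1-5: Excellent (Green)
--     6-9: Good (Yellow-Green)
--     10-12: Fair (Yellow)
--     13-14: Moderate (Orange)
--     15: Poor (Red)
--     """
--     try:
--         group = int(pollution_group)
--         if group < 1 or group > 15:
--             return f"{group}"
--     except (ValueError, TypeError):
--         return "N/A"
--
--     # Use colored emoji squares for better visibility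
--     GREEN = "🟩"
--     YELLOW_GREEN = "🟨"
--     YELLOW = "🟧"
--     ORANGE = "🟥"
--     RED = "⬛"
--     SELECTED = "◉"
--
--     # Create visual scale segments
--     segments = []
--     for i in range(1, 16):
--         if i == group:
--             # Highlight the current position with selection marker
--             segments.append(f"[bold]{SELECTED}[/bold]")
--         else:
--             # Regular segments with color-coded blocks
--             if i <= 5:
--                 segments.append(GREEN)
--             elif i <= 9:
--                 segments.append(YELLOW_GREEN)
--             elif i <= 12:
--                 segments.append(YELLOW)
--             elif i <= 14:
--                 segments.append(ORANGE)
--             else: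
--                 segments.append(RED)
--
--     scale_bar = "".join(segments)
--
--     # Add category description
--     if group <= 5:
--         category = "[bold green]Excellent[/bold green]"
--     elif group <= 9:
--         category = "[bold yellow]Good[/bold yellow]"
--     elif group <= 12:
--         category = "[bold bright_yellow]Fair[/bold bright_yellow]"
--     elif group <= 14:
--         category = "[bold bright_red]Moderate[/bold bright_red]"
--     else:
--         category = "[bold red]Poor[/bold red]"
--
--     return f"{scale_bar} {group}/15 ({category})"
-- ===== SOURCE B (Python) =====
-- _BAR = "\U0001F7E9" * 5 + "\U0001F7E8" * 4 + "\U0001F7E7" * 3 + "\U0001F7E5" * 2 + "\u2B1B"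
-- _LABELS = [
--     "[bold green]Excellent[/bold green]",
--     "[bold yellow]Good[/bold yellow]",
--     "[bold bright_yellow]Fair[/bold bright_yellow]",
--     "[bold bright_red]Moderate[/bold bright_red]",
--     "[bold red]Poor[/bold red]",
-- ]
--
-- def create_pollution_scale(pollution_group: int) -> str:
--     try:
--         group = int(pollution_group)
--     except (ValueError, TypeError):
--         return "N/A"
--     if not 1 <= group <= 15:
--         return f"{group}"
--     # splice the marker into the precomputed bar by string slicing
--     bar = _BAR[:group - 1] + "[bold]\u25C9[/bold]" + _BAR[group:]
--     # count how many cutoffs the group exceeds -> index into the label table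
--     label = _LABELS[(group > 5) + (group > 9) + (group > 12) + (group > 14)]
--     return f"{bar} {group}/15 ({label})"
-- ===== Notes on version B (the rewrite author's own statement) =====
-- stated objective: simpler
-- what changed: B splices the selection marker into a precomputed constant bar string via slicing (no per-position loop or list building) and indexes a label table by counting exceeded cutoffs, instead of A's loop with threshold if/elif chains.
import Mathlib
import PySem

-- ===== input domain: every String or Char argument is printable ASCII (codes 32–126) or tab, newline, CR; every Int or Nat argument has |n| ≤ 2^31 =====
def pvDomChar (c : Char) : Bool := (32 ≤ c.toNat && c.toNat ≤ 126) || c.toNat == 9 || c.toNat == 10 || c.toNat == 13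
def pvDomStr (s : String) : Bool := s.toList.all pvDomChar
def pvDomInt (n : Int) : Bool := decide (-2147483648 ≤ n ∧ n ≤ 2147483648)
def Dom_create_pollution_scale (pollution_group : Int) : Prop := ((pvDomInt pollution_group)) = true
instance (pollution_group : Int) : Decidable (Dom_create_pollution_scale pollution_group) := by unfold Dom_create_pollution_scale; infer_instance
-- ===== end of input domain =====

-- B splices the marker into a precomputed constant bar string by slicing and picks the label
-- by counting exceeded cutoffs as a table index, instead of A's per-position loop with
-- threshold if/elif chains (objective: simpler).

-- ===== PORT A =====
def create_pollution_scale (pollution_group : Int) : String :=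
  let group := pollution_group
  if group < 1 ∨ group > 15 then PySem.Int.toStr group
  else
    let segments : List String := (PySem.List.pyRange 1 16 1).foldl (fun acc i =>
      if i == group then acc ++ ["[bold]◉[/bold]"]
      else if i ≤ 5 then acc ++ ["🟩"]
      else if i ≤ 9 then acc ++ ["🟨"]
      else if i ≤ 12 then acc ++ ["🟧"]
      else if i ≤ 14 then acc ++ ["🟥"]
      else acc ++ ["⬛"]) []
    let scale_bar := String.join segments
    let category :=
      if group ≤ 5 then "[bold green]Excellent[/bold green]"
      else if group ≤ 9 then "[bold yellow]Good[/bold yellow]"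
      else if group ≤ 12 then "[bold bright_yellow]Fair[/bold bright_yellow]"
      else if group ≤ 14 then "[bold bright_red]Moderate[/bold bright_red]"
      else "[bold red]Poor[/bold red]"
    scale_bar ++ " " ++ PySem.Int.toStr group ++ "/15 (" ++ category ++ ")"

-- ===== PORT B =====
def pvBar : String := "🟩🟩🟩🟩🟩🟨🟨🟨🟨🟧🟧🟧🟥🟥⬛"

def pvLabels : List String :=
  ["[bold green]Excellent[/bold green]",
   "[bold yellow]Good[/bold yellow]",
   "[bold bright_yellow]Fair[/bold bright_yellow]",
   "[bold bright_red]Moderate[/bold bright_red]",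
   "[bold red]Poor[/bold red]"]

def create_pollution_scale_alt (pollution_group : Int) : String :=
  let group := pollution_group
  if ¬ (1 ≤ group ∧ group ≤ 15) then PySem.Int.toStr group
  else
    -- bar = _BAR[:group-1] + marker + _BAR[group:]  (Python string slicing, exact via PySem.List.slice on chars)
    let bar := String.mk (PySem.List.slice pvBar.toList none (some (group - 1)))
               ++ "[bold]◉[/bold]"
               ++ String.mk (PySem.List.slice pvBar.toList (some group) none)
    -- label index = number of cutoffs exceeded (always 0..4, so the lookup is in range)
    let idx : Int := (if group > 5 then 1 else 0) + (if group > 9 then 1 else 0)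
                   + (if group > 12 then 1 else 0) + (if group > 14 then 1 else 0)
    let label := (PySem.List.pyGet? pvLabels idx).getD ""
    bar ++ " " ++ PySem.Int.toStr group ++ "/15 (" ++ label ++ ")"

-- ===== PRECONDITION & SPEC =====
def Spec_create_pollution_scale (pollution_group : Int) (out : String) : Prop := out = create_pollution_scale_alt pollution_group
instance (pollution_group : Int) (out : String) : Decidable (Spec_create_pollution_scale pollution_group out) := by unfold Spec_create_pollution_scale; infer_instance

-- ===== CLAIM (what is proved, stated in full; the proofs are below) =====
def Claim_equal_create_pollution_scale : Prop := ∀ (pollution_group : Int), Dom_create_pollution_scale pollution_group → Spec_create_pollution_scale pollution_group (create_pollution_scale pollution_group)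

-- ===== LEMMAS AND PROOFS =====

-- ===== VERDICT (by name: the statement is the Claim_ definition above) =====
set_option maxHeartbeats 4000000 in
theorem create_pollution_scale_spec : Claim_equal_create_pollution_scale := by
  intro g _
  unfold Spec_create_pollution_scale
  by_cases h : 1 ≤ g ∧ g ≤ 15
  · obtain ⟨h1, h2⟩ := h
    interval_cases g <;> decide
  · simp only [create_pollution_scale, create_pollution_scale_alt]
    rw [if_pos (by omega), if_pos (by omega)]
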